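-- pv_equiv track=rewrite | github.com/AbhaySinha1909/HackWithInfy-LNCT-26 | 12_03_26.py | max_non_adjacent_dish
-- ===== SOURCE A (Python) =====
-- from collections import defaultdict
--
-- def max_non_adjacent_dish(n, A):
--     pos = defaultdict(list)
--
--     # store indices of each dish type
--     for i, v in enumerate(A):
--         pos[v].append(i)
--
--     best_type = None
--     best_count = 0
--
--     for dish in pos:
--         indices = pos[dish]
--
--         count = 0
--         last = -2
--
--         for idx in indices:
--             if idx - last > 1:
--                 count += 1
--                 last = idx
--
--         if count > best_count or (count == best_count and (best_type is None or dish < best_type)):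
--             best_count = count
--             best_type = dish
--
--     return best_type
-- ===== SOURCE B (Python) =====
-- def max_non_adjacent_dish(n, A):
--     # Run-length parity: within each maximal run of consecutive equal values,
--     # the greedy non-adjacent selection takes exactly the elements at even
--     # offset in the run, so count each element whose streak length is even.
--     count = {}
--     streak = 0
--     prev = None
--     for i, v in enumerate(A):
--         streak = streak + 1 if (i > 0 and v == prev) else 0
--         prev = v
--         if streak % 2 == 0:
--             count[v] = count.get(v, 0) + 1
--     if not count:
--         return None
--     return min(count.items(), key=lambda kv: (-kv[1], kv[0]))[0]
-- ===== Notes on version B (the rewrite author's own statement) =====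
-- stated objective: alternative
-- what changed: B drops A's per-dish index lists and greedy last-index re-scans entirely: it counts, in one flat pass, the elements whose offset inside their maximal run of consecutive equal values is even (which is exactly the greedy non-adjacent selection), then picks the answer with a single min over the counts keyed by (-count, dish).
import Mathlib
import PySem

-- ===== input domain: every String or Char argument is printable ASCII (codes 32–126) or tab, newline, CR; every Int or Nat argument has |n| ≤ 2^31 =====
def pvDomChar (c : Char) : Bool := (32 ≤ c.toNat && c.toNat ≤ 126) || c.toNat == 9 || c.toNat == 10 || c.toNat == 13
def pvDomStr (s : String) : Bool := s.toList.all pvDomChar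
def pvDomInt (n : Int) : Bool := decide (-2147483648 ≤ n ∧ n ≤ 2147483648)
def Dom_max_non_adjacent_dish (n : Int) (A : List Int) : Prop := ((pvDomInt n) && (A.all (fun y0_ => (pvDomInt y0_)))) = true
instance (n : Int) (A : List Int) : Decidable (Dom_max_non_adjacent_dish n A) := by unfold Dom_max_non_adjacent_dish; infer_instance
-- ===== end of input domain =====

-- B counts each element whose offset inside its maximal run of consecutive equal values is even (run-length parity), then selects with one min-by-lexicographic-key; alternative algorithm, same result.


-- ===== PORT A =====
def max_non_adjacent_dish (n : Int) (A : List Int) : Option Int :=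
  let pos : PySem.Dict Int (List Int) :=
    (PySem.List.enumerate A).foldl (fun d p => d.modify p.2 [] (fun xs => xs ++ [p.1])) PySem.Dict.empty
  (pos.keys.foldl (fun acc dish =>
      let indices := pos.getD dish []
      let cl := indices.foldl
          (fun cl idx => if idx - cl.2 > 1 then (cl.1 + 1, idx) else cl) ((0 : Int), (-2 : Int))
      if decide (cl.1 > acc.2) || (cl.1 == acc.2 && acc.1.elim true (fun b => decide (dish < b)))
      then (some dish, cl.1) else acc) ((none : Option Int), (0 : Int))).1

-- ===== PORT B =====
def max_non_adjacent_dish_alt (n : Int) (A : List Int) : Option Int :=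
  let st := (PySem.List.enumerate A).foldl (fun s p =>
      let streak : Int := if decide (p.1 > 0) && (some p.2 == s.2.2) then s.2.1 + 1 else 0
      let cnt := if PySem.Int.mod streak 2 == 0 then s.1.insert p.2 (s.1.getD p.2 0 + 1) else s.1
      (cnt, streak, some p.2))
    ((PySem.Dict.empty : PySem.Dict Int Int), (0 : Int), (none : Option Int))
  if st.1.items.isEmpty then none
  else (PySem.List.min2? st.1.items (fun kv => -kv.2) (fun kv => kv.1)).map Prod.fst

-- ===== PRECONDITION & SPEC =====
def Spec_max_non_adjacent_dish (n : Int) (A : List Int) (out : Option Int) : Prop := out = max_non_adjacent_dish_alt n A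
instance (n : Int) (A : List Int) (out : Option Int) : Decidable (Spec_max_non_adjacent_dish n A out) := by unfold Spec_max_non_adjacent_dish; infer_instance

-- ===== CLAIM (what is proved, stated in full; the proofs are below) =====
def Claim_equal_max_non_adjacent_dish : Prop := ∀ (n : Int) (A : List Int), Dom_max_non_adjacent_dish n A → Spec_max_non_adjacent_dish n A (max_non_adjacent_dish n A)

-- ===== LEMMAS AND PROOFS =====

-- greedy step / greedy fold over an index list (A's inner loop)
def pvGStep (cl : Int × Int) (idx : Int) : Int × Int :=
  if idx - cl.2 > 1 then (cl.1 + 1, idx) else cl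

def pvG (xs : List Int) : Int × Int := xs.foldl pvGStep ((0 : Int), (-2 : Int))

-- A's grouping loop and B's fused counting loop, named for the proofs
def pvLoopA (l : List (Int × Int)) (d : PySem.Dict Int (List Int)) : PySem.Dict Int (List Int) :=
  l.foldl (fun d p => d.modify p.2 [] (fun xs => xs ++ [p.1])) d

def pvBStep (s : PySem.Dict Int Int × Int × Option Int) (p : Int × Int) :
    PySem.Dict Int Int × Int × Option Int :=
  let streak : Int := if decide (p.1 > 0) && (some p.2 == s.2.2) then s.2.1 + 1 else 0
  let cnt := if PySem.Int.mod streak 2 == 0 then s.1.insert p.2 (s.1.getD p.2 0 + 1) else s.1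
  (cnt, streak, some p.2)

-- count-mapped dict: each per-dish index list replaced by its greedy count
def pvCnt (d : PySem.Dict Int (List Int)) : PySem.Dict Int Int :=
  ⟨d.items.map (fun p => (p.1, (pvG p.2).1))⟩

theorem pvG_append (xs : List Int) (i : Int) : pvG (xs ++ [i]) = pvGStep (pvG xs) i := by
  simp [pvG, List.foldl_append]

theorem get?_pvCnt (d : PySem.Dict Int (List Int)) (k : Int) :
    (pvCnt d).get? k = (d.get? k).map (fun xs => (pvG xs).1) := by
  simp [pvCnt, PySem.Dict.get?, List.find?_map, Function.comp_def, Option.map_map]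

theorem getD_pvCnt (d : PySem.Dict Int (List Int)) (k : Int) :
    (pvCnt d).getD k 0 = (pvG (d.getD k [])).1 := by
  simp only [PySem.Dict.getD, get?_pvCnt]
  cases d.get? k <;> simp [pvG]

theorem keys_pvCnt (d : PySem.Dict Int (List Int)) : (pvCnt d).keys = d.keys := by
  simp [pvCnt, PySem.Dict.keys]

theorem contains_pvCnt (d : PySem.Dict Int (List Int)) (k : Int) :
    (pvCnt d).contains k = d.contains k := by
  rw [PySem.Dict.contains_eq_isSome_get?, PySem.Dict.contains_eq_isSome_get?, get?_pvCnt]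
  cases d.get? k <;> rfl

theorem insert_pvCnt (d : PySem.Dict Int (List Int)) (k : Int) (v : List Int) :
    pvCnt (d.insert k v) = (pvCnt d).insert k (pvG v).1 := by
  apply PySem.Dict.ext
  show (d.insert k v).items.map _ = ((pvCnt d).insert k (pvG v).1).items
  rw [PySem.Dict.items_insert, PySem.Dict.items_insert, contains_pvCnt]
  by_cases h : d.contains k = true
  · simp only [h, if_pos]
    show _ = (pvCnt d).items.map _
    simp only [pvCnt, List.map_map]
    apply List.map_congr_left
    intro p _
    by_cases hk : p.1 = k <;> simp [hk]
  · simp only [h]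
    simp [pvCnt]

theorem insert_self_of_get? {ν : Type} (d : PySem.Dict Int ν) (k : Int) (v : ν)
    (hnd : d.keys.Nodup) (h : d.get? k = some v) : d.insert k v = d := by
  apply PySem.Dict.ext
  rw [PySem.Dict.items_insert]
  have hc : d.contains k = true := by
    rw [PySem.Dict.contains_eq_isSome_get?, h]; rfl
  simp only [hc, if_pos]
  have hmem : (k, v) ∈ d.items := PySem.Dict.mem_items_of_get?_eq_some d h
  conv_rhs => rw [← List.map_id d.items]
  apply List.map_congr_left
  intro p hp
  by_cases hk : (p.1 == k) = true
  · have : p = (k, v) := by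
      have := List.inj_on_of_nodup_map (f := Prod.fst) (l := d.items) hnd hp hmem
      have hfst : p.1 = k := by exact eq_of_beq hk
      exact this (by simp [hfst])
    simp [this]
  · simp [hk]

-- re-establishing the run-parity invariant after one step
theorem pvH3_next (pos : PySem.Dict Int (List Int)) (v i streak s' : Int) (nl : List Int)
    (prev : Option Int) (hi : 0 ≤ i)
    (h3 : ∀ k, if prev = some k ∧ 0 < i
          then (pvG (pos.getD k [])).2 = i - 1 - streak % 2
          else (pvG (pos.getD k [])).2 ≤ i - 2)
    (hv : (pvG nl).2 = i - s' % 2) :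
    ∀ k, if some v = some k ∧ 0 < i + 1
         then (pvG ((pos.insert v nl).getD k [])).2 = (i + 1) - 1 - s' % 2
         else (pvG ((pos.insert v nl).getD k [])).2 ≤ (i + 1) - 2 := by
  intro k
  by_cases hk : k = v
  · subst hk
    rw [if_pos ⟨rfl, by omega⟩, PySem.Dict.getD_insert_self]
    omega
  · rw [if_neg (fun h => hk (Option.some_inj.mp h.1).symm),
        PySem.Dict.getD_insert_of_ne pos nl [] hk]
    have h3k := h3 k
    split_ifs at h3k <;> omega

-- main invariant: B's fused parity pass computes pvCnt of A's grouping loop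
theorem loop_inv (xs : List Int) : ∀ (i streak : Int) (prev : Option Int)
    (pos : PySem.Dict Int (List Int)),
    0 ≤ i → pos.keys.Nodup →
    (∀ k, if prev = some k ∧ 0 < i
          then (pvG (pos.getD k [])).2 = i - 1 - streak % 2
          else (pvG (pos.getD k [])).2 ≤ i - 2) →
    ((PySem.List.enumerate xs i).foldl pvBStep (pvCnt pos, streak, prev)).1
      = pvCnt (pvLoopA (PySem.List.enumerate xs i) pos) := by
  induction xs with
  | nil => intro i streak prev pos _ _ _; rfl
  | cons v t ih =>
    intro i streak prev pos hi hnd h3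
    have hmod2 : ∀ z : Int, PySem.Int.mod z 2 = z % 2 := fun z =>
      PySem.Int.mod_eq_emod_of_pos (by norm_num)
    have hstep : pos.modify v [] (fun xs => xs ++ [i]) = pos.insert v (pos.getD v [] ++ [i]) := rfl
    have hnd' : (pos.insert v (pos.getD v [] ++ [i])).keys.Nodup :=
      PySem.Dict.nodup_keys_insert pos v _ hnd
    show ((PySem.List.enumerate t (i+1)).foldl pvBStep (pvBStep (pvCnt pos, streak, prev) (i, v))).1
        = pvCnt (pvLoopA (PySem.List.enumerate t (i+1)) (pos.modify v [] (fun xs => xs ++ [i])))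
    rw [hstep]
    by_cases hb : 0 < i ∧ prev = some v
    · -- continuing a run of equal values
      have h3v := h3 v
      rw [if_pos ⟨hb.2, hb.1⟩] at h3v
      have hs2 : streak % 2 = 0 ∨ streak % 2 = 1 := by omega
      have hBstep : pvBStep (pvCnt pos, streak, prev) (i, v)
          = (if PySem.Int.mod (streak + 1) 2 == 0
              then (pvCnt pos).insert v ((pvCnt pos).getD v 0 + 1) else pvCnt pos,
             streak + 1, some v) := by
        simp only [pvBStep, hb.2]
        have hc : (decide ((i, v).1 > 0) && (some (i, v).2 == some v)) = true := by
          simp [hb.1]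
        rw [hc]
        simp
      rw [hBstep]
      rcases hs2 with hpar | hpar
      · -- streak even: this element is NOT selected (adjacent to the last pick)
        have hnotpick : ¬ (i - (pvG (pos.getD v [])).2 > 1) := by omega
        have hcnt : pvG (pos.getD v [] ++ [i]) = pvG (pos.getD v []) := by
          rw [pvG_append, pvGStep, if_neg hnotpick]
        have hcontains : pos.get? v = some (pos.getD v []) := by
          cases hget : pos.get? v with
          | none =>
            exfalso
            have hnil : pos.getD v [] = [] := by simp [PySem.Dict.getD, hget]
            rw [hnil] at h3v
            have : ((-2 : Int)) = i - 1 - streak % 2 := h3v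
            omega
          | some ys => simp [PySem.Dict.getD, hget]
        have hins : pvCnt (pos.insert v (pos.getD v [] ++ [i])) = pvCnt pos := by
          rw [insert_pvCnt, hcnt]
          exact insert_self_of_get? (pvCnt pos) v (pvG (pos.getD v [])).1
            (by rw [keys_pvCnt]; exact hnd)
            (by rw [get?_pvCnt, hcontains]; rfl)
        have hpar' : (PySem.Int.mod (streak + 1) 2 == 0) = false := by
          rw [hmod2]; simp; omega
        rw [hpar', if_neg (by simp), ← hins]
        apply ih (i+1) (streak+1) (some v) _ (by omega) hnd'
        exact pvH3_next pos v i streak (streak+1) _ prev hi h3 (by rw [hcnt]; omega)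
      · -- streak odd: this element IS selected
        have hpick : i - (pvG (pos.getD v [])).2 > 1 := by omega
        have hcnt : pvG (pos.getD v [] ++ [i]) = ((pvG (pos.getD v [])).1 + 1, i) := by
          rw [pvG_append, pvGStep, if_pos hpick]
        have hpar' : (PySem.Int.mod (streak + 1) 2 == 0) = true := by
          rw [hmod2]; simp; omega
        rw [hpar', if_pos (by simp), getD_pvCnt]
        rw [show (pvCnt pos).insert v ((pvG (pos.getD v [])).1 + 1)
              = pvCnt (pos.insert v (pos.getD v [] ++ [i])) by rw [insert_pvCnt, hcnt]]
        apply ih (i+1) (streak+1) (some v) _ (by omega) hnd'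
        exact pvH3_next pos v i streak (streak+1) _ prev hi h3 (by rw [hcnt]; simp; omega)
    · -- start of a run (i = 0 or value change): always selected
      have h3v := h3 v
      rw [if_neg (fun h => hb ⟨h.2, h.1⟩)] at h3v
      have hpick : i - (pvG (pos.getD v [])).2 > 1 := by omega
      have hcnt : pvG (pos.getD v [] ++ [i]) = ((pvG (pos.getD v [])).1 + 1, i) := by
        rw [pvG_append, pvGStep, if_pos hpick]
      have hBstep : pvBStep (pvCnt pos, streak, prev) (i, v)
          = ((pvCnt pos).insert v ((pvCnt pos).getD v 0 + 1), 0, some v) := by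
        simp only [pvBStep]
        have hcond : (decide ((i, v).1 > 0) && (some (i, v).2 == prev)) = false := by
          rcases (not_and_or.mp hb) with h | h
          · simp; intro hpos; exact absurd hpos h
          · cases prev with
            | none => simp
            | some w =>
              have hne : w ≠ v := fun he => h (by rw [he])
              simp
              omega
        rw [hcond]
        norm_num [PySem.Int.mod]
      rw [hBstep, getD_pvCnt]
      rw [show (pvCnt pos).insert v ((pvG (pos.getD v [])).1 + 1)
            = pvCnt (pos.insert v (pos.getD v [] ++ [i])) by rw [insert_pvCnt, hcnt]]
      apply ih (i+1) 0 (some v) _ (by omega) hnd'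
      exact pvH3_next pos v i streak 0 _ prev hi h3 (by rw [hcnt]; simp)

theorem enumerate_nonneg {α : Type} (xs : List α) (s : Int) (hs : 0 ≤ s) :
    ∀ p ∈ PySem.List.enumerate xs s, 0 ≤ p.1 := by
  induction xs generalizing s with
  | nil => intro p hp; simp [PySem.List.enumerate] at hp
  | cons x t ih =>
    intro p hp
    simp only [PySem.List.enumerate, List.mem_cons] at hp
    rcases hp with h | h
    · simp [h]; exact hs
    · exact ih (s + 1) (by omega) p h

-- every per-dish index list built by A's grouping loop is nonempty with nonneg entries
theorem loopA_items_good (l : List (Int × Int)) : ∀ (d : PySem.Dict Int (List Int)),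
    (∀ p ∈ l, 0 ≤ p.1) → (∀ q ∈ d.items, q.2 ≠ [] ∧ ∀ x ∈ q.2, 0 ≤ x) →
    ∀ q ∈ (pvLoopA l d).items, q.2 ≠ [] ∧ ∀ x ∈ q.2, 0 ≤ x := by
  induction l with
  | nil => intro d _ hd q hq; exact hd q hq
  | cons p t ih =>
    intro d hl hd
    have hstep : d.modify p.2 [] (fun xs => xs ++ [p.1]) = d.insert p.2 (d.getD p.2 [] ++ [p.1]) := rfl
    show ∀ q ∈ (pvLoopA t (d.modify p.2 [] (fun xs => xs ++ [p.1]))).items, _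
    rw [hstep]
    apply ih _ (fun q hq => hl q (List.mem_cons_of_mem _ hq))
    intro q hq
    rcases (PySem.Dict.mem_items_insert _ _ _ _).mp hq with hq | hq
    · subst hq
      refine ⟨by simp, ?_⟩
      intro x hx
      rcases List.mem_append.mp hx with hx | hx
      · cases hget : d.get? p.2 with
        | none => simp [PySem.Dict.getD, hget] at hx
        | some xs =>
          have : (p.2, xs) ∈ d.items := PySem.Dict.mem_items_of_get?_eq_some d hget
          have hgd : d.getD p.2 [] = xs := by simp [PySem.Dict.getD, hget]
          exact (hd _ this).2 x (by rw [hgd] at hx; exact hx)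
      · have : x = p.1 := by simpa using hx
        subst this
        exact hl p (List.mem_cons_self ..)
    · exact hd q hq.1

theorem pvG_fst_mono (t : List Int) : ∀ cl : Int × Int, cl.1 ≤ (t.foldl pvGStep cl).1 := by
  induction t with
  | nil => intro cl; exact le_refl _
  | cons x s ih =>
    intro cl
    refine le_trans ?_ (ih (pvGStep cl x))
    unfold pvGStep
    split_ifs <;> simp

theorem pvG_fst_pos (xs : List Int) (hne : xs ≠ []) (hnn : ∀ x ∈ xs, 0 ≤ x) :
    1 ≤ (pvG xs).1 := by
  cases xs with
  | nil => exact absurd rfl hne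
  | cons y t =>
    have hy : 0 ≤ y := hnn y (List.mem_cons_self ..)
    have h1 : pvGStep ((0 : Int), (-2 : Int)) y = (1, y) := by
      unfold pvGStep; rw [if_pos (by omega)]; norm_num
    show 1 ≤ ((y :: t).foldl pvGStep ((0 : Int), (-2 : Int))).1
    rw [List.foldl_cons, h1]
    exact pvG_fst_mono t (1, y)

-- selection step of A's running-best loop
def pvSel (acc : Option Int × Int) (dish c : Int) : Option Int × Int :=
  if decide (c > acc.2) || (c == acc.2 && acc.1.elim true (fun b => decide (dish < b)))
  then (some dish, c) else acc

-- step of PySem.List.min2? specialised to key (-count, dish)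
def pvM2Step (acc : Option (Int × Int)) (x : Int × Int) : Option (Int × Int) :=
  match acc with
  | none => some x
  | some m =>
    if (decide (-x.2 < -m.2) || (!decide (-m.2 < -x.2) && decide (x.1 < m.1))) then some x else some m

theorem min2?_eq_foldl (l : List (Int × Int)) :
    PySem.List.min2? l (fun kv => -kv.2) (fun kv => kv.1) = l.foldl pvM2Step none := by
  unfold PySem.List.min2?
  congr 1
  funext acc x
  cases acc <;> rfl

theorem sel_rel (l : List (Int × Int)) : ∀ (b c : Int),
    (l.foldl (fun acc p => pvSel acc p.1 p.2) (some b, c)).1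
      = (l.foldl pvM2Step (some (b, c))).map Prod.fst := by
  induction l with
  | nil => intro b c; rfl
  | cons p t ih =>
    intro b c
    have e1 : ((-p.2 : Int) < -c) ↔ (c < p.2) := by omega
    have e2 : ((-c : Int) < -p.2) ↔ (p.2 < c) := by omega
    have hcond : (decide (p.2 > c) || (p.2 == c && (some b).elim true (fun x => decide (p.1 < x))))
        = (decide (-p.2 < -c) || (!decide (-c < -p.2) && decide (p.1 < b))) := by
      by_cases h1 : c < p.2 <;> by_cases h2 : p.2 = c <;> by_cases h4 : p.2 < c <;>
        by_cases h3 : p.1 < b <;>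
        first
          | (exfalso; omega)
          | simp [e1, e2, h1, h2, h4, h3, gt_iff_lt, Option.elim]
    have hstepA : pvSel (some b, c) p.1 p.2
        = if (decide (-p.2 < -c) || (!decide (-c < -p.2) && decide (p.1 < b)))
          then (some p.1, p.2) else (some b, c) := by
      unfold pvSel
      rw [hcond]
    have hstepB : pvM2Step (some (b, c)) p
        = if (decide (-p.2 < -c) || (!decide (-c < -p.2) && decide (p.1 < b)))
          then some p else some (b, c) := rfl
    rw [List.foldl_cons, List.foldl_cons, hstepA, hstepB]
    by_cases hc : (decide (-p.2 < -c) || (!decide (-c < -p.2) && decide (p.1 < b))) = true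
    · rw [if_pos hc, if_pos hc]
      have := ih p.1 p.2
      rw [Prod.mk.eta] at this
      exact this
    · rw [if_neg hc, if_neg hc]
      exact ih b c

theorem sel_eq (l : List (Int × Int)) (h : ∀ p ∈ l, 1 ≤ p.2) :
    (l.foldl (fun acc p => pvSel acc p.1 p.2) ((none : Option Int), (0 : Int))).1
      = (if l.isEmpty then none else (l.foldl pvM2Step none).map Prod.fst) := by
  cases l with
  | nil => rfl
  | cons p t =>
    have hp : 1 ≤ p.2 := h p (List.mem_cons_self ..)
    have hfirst : pvSel ((none : Option Int), (0 : Int)) p.1 p.2 = (some p.1, p.2) := by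
      unfold pvSel
      rw [if_pos]
      simp; omega
    show ((t.foldl (fun acc p => pvSel acc p.1 p.2) (pvSel (none, 0) p.1 p.2))).1 = _
    rw [hfirst]
    simp only [List.isEmpty_cons, Bool.false_eq_true, if_false]
    show _ = (t.foldl pvM2Step (pvM2Step none p)).map Prod.fst
    have hm : pvM2Step none p = some (p.1, p.2) := by rw [Prod.mk.eta]; rfl
    rw [hm]
    exact sel_rel t p.1 p.2

-- ===== VERDICT (by name: the statement is the Claim_ definition above) =====
theorem max_non_adjacent_dish_spec : Claim_equal_max_non_adjacent_dish := by
  intro n A _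
  unfold Spec_max_non_adjacent_dish
  set pos := pvLoopA (PySem.List.enumerate A) PySem.Dict.empty with hpos
  have hnd : pos.keys.Nodup :=
    PySem.Dict.nodup_keys_foldl_modify_key _ Prod.snd []
      (fun _ q xs => xs ++ [q.1]) PySem.Dict.empty PySem.Dict.nodup_keys_empty
  have hstate : ((PySem.List.enumerate A).foldl pvBStep
      ((PySem.Dict.empty : PySem.Dict Int Int), (0 : Int), (none : Option Int))).1 = pvCnt pos := by
    have := loop_inv A 0 0 none PySem.Dict.empty le_rfl PySem.Dict.nodup_keys_empty
      (by intro k; rw [if_neg (by simp)]; show ((-2 : Int)) ≤ 0 - 2; omega)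
    exact this
  have e1 : max_non_adjacent_dish n A
      = ((pos.keys.map (fun k => (k, (pvG (pos.getD k [])).1))).foldl
          (fun acc p => pvSel acc p.1 p.2) ((none : Option Int), (0 : Int))).1 := by
    rw [List.foldl_map]; rfl
  have e2 : max_non_adjacent_dish_alt n A
      = (if (pvCnt pos).items.isEmpty then none
         else ((pvCnt pos).items.foldl pvM2Step none).map Prod.fst) := by
    show (if ((PySem.List.enumerate A).foldl pvBStep
        ((PySem.Dict.empty : PySem.Dict Int Int), (0 : Int), (none : Option Int))).1.items.isEmpty
        then none
        else (PySem.List.min2? ((PySem.List.enumerate A).foldl pvBStep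
          ((PySem.Dict.empty : PySem.Dict Int Int), (0 : Int), (none : Option Int))).1.items
          (fun kv => -kv.2) (fun kv => kv.1)).map Prod.fst) = _
    rw [hstate, min2?_eq_foldl]
  have hitems : (pvCnt pos).items
      = pos.keys.map (fun k => (k, (pvG (pos.getD k [])).1)) := by
    show (pos.items).map _ = _
    rw [PySem.Dict.items_eq_map_keys _ hnd []]
    simp [List.map_map, Function.comp_def]
  have hgood : ∀ q ∈ pos.items, q.2 ≠ [] ∧ ∀ x ∈ q.2, 0 ≤ x :=
    loopA_items_good _ PySem.Dict.empty (enumerate_nonneg A 0 le_rfl) (by intro q hq; cases hq)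
  have hge1 : ∀ p ∈ (pvCnt pos).items, 1 ≤ p.2 := by
    intro p hp
    rcases List.mem_map.mp hp with ⟨q, hq, rfl⟩
    exact pvG_fst_pos q.2 (hgood q hq).1 (hgood q hq).2
  rw [e1, e2, ← hitems, sel_eq _ hge1]
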